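-- pv_equiv track=rewrite | github.com/maurete/pfc | data/feats.py | mipred_feats
-- ===== SOURCE A (Python) =====
-- def mipred_feats ( sequence, structure ):
--     """
--     Calcula las sig. 23 caracteristicas segun miPred: A, C, G, U, G+C, A+U,
--     AA, AC, AG, AU, CA, CC, CG, CU, GA, GC, GG, GU, UA, UC, UG, UU, pb
--     @param sequence: string de secuencia (long. N)
--     @param structure: string de estructura secundaria (long. N)
--     @return: 23-vector con las features
--     @rtype: list
--     """
--
--     # las longitudes deben coincidir
--     if len(sequence) != len(structure):
--         raise Exception( "sequence and structure differ in length!" )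
--
--     out = []
--
--     # 4 nucleotidos
--     for n in 'ACGU':
--         out.append(sequence.count(n))
--
--     out.append(out[2]+out[1]) # G+C
--     out.append(out[0]+out[3]) # A+U
--
--     # 16 dinucleotidos
--     count = {}
--     for n in 'ACGU':
--         for m in 'ACGU':
--             count[n+m] = 0
--
--     # scan dinucleotidos
--     for i in range(len(sequence)-1):
--         count[sequence[i:i+2]] += 1
--
--     # agrego al vector
--     for n in 'ACGU':
--         for m in 'ACGU':
--             out.append(count[n+m])
--
--     # base pairings
--     bp = structure.count('(')
--     bp2 = structure.count(')')
--     assert(bp == bp2)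
--     out.append(bp) # pb
--
--     return out
-- ===== SOURCE B (Python) =====
-- def mipred_feats(sequence, structure):
--     """23 miPred features via a flat 20-counter array indexed arithmetically
--     (0-3 nucleotides, 4+4*prev+cur dinucleotides), filled in one pass that
--     carries the previous nucleotide's index instead of re-scanning."""
--
--     if len(sequence) != len(structure):
--         raise Exception("sequence and structure differ in length!")
--
--     cnt = [0] * 20
--     prev = -1
--     for c in sequence:
--         k = 'ACGU'.find(c)
--         if k >= 0:
--             cnt[k] += 1
--             if prev >= 0:
--                 cnt[4 + 4 * prev + k] += 1
--         prev = k
--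
--     bp = structure.count('(')
--     assert bp == structure.count(')')
--
--     return cnt[:4] + [cnt[2] + cnt[1], cnt[0] + cnt[3]] + cnt[4:] + [bp]
-- ===== Notes on version B (the rewrite author's own statement) =====
-- stated objective: alternative
-- what changed: A builds the vector in staged passes (four str.count scans, a dict pre-seeded with the 16 ACGU pairs filled by a slicing scan, then nested-loop dict lookups); B keeps a flat 20-slot counter array addressed arithmetically ('ACGU'.find index 0-3 for nucleotides, slot 4+4*prev+cur for dinucleotides) and fills it in one character pass that carries the previous nucleotide's index, then assembles the 23-vector by list slicing.
import Mathlib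
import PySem

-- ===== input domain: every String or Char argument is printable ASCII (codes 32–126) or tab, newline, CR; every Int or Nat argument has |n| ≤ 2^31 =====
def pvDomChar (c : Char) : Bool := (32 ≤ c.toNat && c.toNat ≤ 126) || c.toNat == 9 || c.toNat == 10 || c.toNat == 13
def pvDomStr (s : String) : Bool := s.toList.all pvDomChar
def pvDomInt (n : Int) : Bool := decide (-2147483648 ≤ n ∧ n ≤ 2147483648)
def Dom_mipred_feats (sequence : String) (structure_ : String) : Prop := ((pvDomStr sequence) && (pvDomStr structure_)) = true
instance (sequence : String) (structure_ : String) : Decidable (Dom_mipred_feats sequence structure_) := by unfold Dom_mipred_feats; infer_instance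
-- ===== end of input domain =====

-- B replaces A's staged passes (four .count scans, a pre-seeded 16-key string-dict filled by
-- a slicing scan) with a flat 20-slot counter array addressed arithmetically (4+4*prev+cur),
-- filled in one character pass that carries the previous nucleotide's index (alternative
-- decomposition, same asymptotic cost).


-- ===== PORT A =====
-- A-side helper: the dict pre-seeded with all 16 ACGU dinucleotides at 0
def mipredSeed : PySem.Dict (List Char) Int :=
  ['A','C','G','U'].foldl
    (fun d n => ['A','C','G','U'].foldl (fun d m => d.insert [n, m] 0) d)
    PySem.Dict.empty

-- the length-mismatch raise, the KeyError of `count[...] += 1` and the assert are excluded by Pre_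
def mipred_feats (sequence : String) (structure_ : String) : List Int :=
  let s := sequence.toList
  let out : List Int :=
    ['A','C','G','U'].foldl (fun out n => out ++ [(PySem.Chars.count s [n] : Int)]) []
  let out := out ++ [PySem.List.pyGetD out 2 0 + PySem.List.pyGetD out 1 0]
  let out := out ++ [PySem.List.pyGetD out 0 0 + PySem.List.pyGetD out 3 0]
  let count :=
    (PySem.List.pyRange 0 (PySem.Str.len sequence - 1) 1).foldl
      (fun d i =>
        d.insert (PySem.List.slice s (some i) (some (i + 2)))
          (d.getD (PySem.List.slice s (some i) (some (i + 2))) 0 + 1))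
      mipredSeed
  let out := out ++
    (['A','C','G','U'].foldl (fun o n =>
      ['A','C','G','U'].foldl (fun o m => o ++ [count.getD [n, m] 0]) o) [])
  let bp : Int := (PySem.Str.count structure_ "(" : Int)
  out ++ [bp]

-- ===== PORT B =====
-- cnt[k] += 1; k is always in [0, 20) where B bumps, so pySetD/pyGetD are exact
def mipredBump (l : List Int) (k : Int) : List Int :=
  PySem.List.pySetD l k (PySem.List.pyGetD l k 0 + 1)

-- one iteration of B's loop: k = 'ACGU'.find(c); count c and, if prev was a
-- nucleotide, the dinucleotide slot 4 + 4*prev + k; remember k as the new prev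
def mipredStep (st : List Int × Int) (c : Char) : List Int × Int :=
  let k := PySem.Chars.find "ACGU".toList [c]
  let cnt :=
    if 0 ≤ k then
      let cnt := mipredBump st.1 k
      if 0 ≤ st.2 then mipredBump cnt (4 + 4 * st.2 + k) else cnt
    else st.1
  (cnt, k)

def mipred_feats_alt (sequence : String) (structure_ : String) : List Int :=
  let st := sequence.toList.foldl mipredStep (List.replicate 20 0, -1)
  let cnt := st.1
  let bp : Int := (PySem.Str.count structure_ "(" : Int)
  PySem.List.slice cnt none (some 4)
    ++ [PySem.List.pyGetD cnt 2 0 + PySem.List.pyGetD cnt 1 0,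
        PySem.List.pyGetD cnt 0 0 + PySem.List.pyGetD cnt 3 0]
    ++ PySem.List.slice cnt (some 4) none
    ++ [bp]

-- ===== PRECONDITION & SPEC =====
-- Exactly where Python A returns: equal lengths (else Exception), balanced parens (else
-- AssertionError), and — when len ≥ 2 — only ACGU characters (else the dinucleotide
-- scan `count[sequence[i:i+2]] += 1` raises KeyError).
def Pre_mipred_feats (sequence : String) (structure_ : String) : Prop :=
  sequence.toList.length = structure_.toList.length ∧
  structure_.toList.count '(' = structure_.toList.count ')' ∧
  (sequence.toList.length ≤ 1 ∨
    sequence.toList.all (fun c => "ACGU".toList.contains c) = true)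
instance (sequence : String) (structure_ : String) : Decidable (Pre_mipred_feats sequence structure_) := by unfold Pre_mipred_feats; infer_instance

def pvWitness_mipred_feats : String × String := ("ACGU", "(())")

def Spec_mipred_feats (sequence : String) (structure_ : String) (out : List Int) : Prop := out = mipred_feats_alt sequence structure_
instance (sequence : String) (structure_ : String) (out : List Int) : Decidable (Spec_mipred_feats sequence structure_ out) := by unfold Spec_mipred_feats; infer_instance

-- ===== CLAIM (what is proved, stated in full; the proofs are below) =====
def Claim_equal_mipred_feats : Prop := ∀ (sequence : String) (structure_ : String), Dom_mipred_feats sequence structure_ → Pre_mipred_feats sequence structure_ → Spec_mipred_feats sequence structure_ (mipred_feats sequence structure_)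

-- ===== LEMMAS AND PROOFS =====

-- the 20-entry counter vector B's loop maintains, expressed through counts
def cntVec (s : List Char) : List Int :=
  [(s.count 'A' : Int), (s.count 'C' : Int), (s.count 'G' : Int), (s.count 'U' : Int),
   ((s.zip s.tail).count ('A','A') : Int), ((s.zip s.tail).count ('A','C') : Int),
   ((s.zip s.tail).count ('A','G') : Int), ((s.zip s.tail).count ('A','U') : Int),
   ((s.zip s.tail).count ('C','A') : Int), ((s.zip s.tail).count ('C','C') : Int),
   ((s.zip s.tail).count ('C','G') : Int), ((s.zip s.tail).count ('C','U') : Int),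
   ((s.zip s.tail).count ('G','A') : Int), ((s.zip s.tail).count ('G','C') : Int),
   ((s.zip s.tail).count ('G','G') : Int), ((s.zip s.tail).count ('G','U') : Int),
   ((s.zip s.tail).count ('U','A') : Int), ((s.zip s.tail).count ('U','C') : Int),
   ((s.zip s.tail).count ('U','G') : Int), ((s.zip s.tail).count ('U','U') : Int)]

-- the prev value B's loop carries: index of the last character ('ACGU'.find, -1 if none)
def lastIdx (s : List Char) : Int :=
  match s.getLast? with
  | none => -1
  | some c => PySem.Chars.find "ACGU".toList [c]

-- s.count(c) for a single character is List.count
lemma count_go_singleton (c : Char) : ∀ (fuel : Nat) (l : List Char) (acc : Nat),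
    l.length ≤ fuel → PySem.Chars.count.go [c] fuel l acc = acc + l.count c := by
  intro fuel
  induction fuel with
  | zero =>
    intro l acc h
    have hl : l = [] := List.eq_nil_of_length_eq_zero (Nat.le_zero.mp h)
    subst hl
    simp [PySem.Chars.count.go]
  | succ fuel ih =>
    intro l acc h
    cases l with
    | nil => simp [PySem.Chars.count.go]
    | cons x t =>
      by_cases hcx : c = x
      · subst hcx
        have := ih t (acc + 1) (by simpa using Nat.le_of_succ_le_succ h)
        simp [PySem.Chars.count.go, List.isPrefixOf, this]
        omega
      · have := ih t acc (by simpa using Nat.le_of_succ_le_succ h)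
        simp [PySem.Chars.count.go, List.isPrefixOf, hcx, this, Ne.symm hcx]

lemma chars_count_singleton (s : List Char) (c : Char) :
    PySem.Chars.count s [c] = s.count c := by
  simp [PySem.Chars.count, count_go_singleton c s.length s 0 le_rfl]

-- inserting a 0 value keeps every lookup-with-default-0 at 0
lemma getD_insert_zero {κ : Type} [BEq κ] [LawfulBEq κ] [DecidableEq κ] (d : PySem.Dict κ Int)
    (hd : ∀ j, d.getD j 0 = 0) (a : κ) (j : κ) : (d.insert a 0).getD j 0 = 0 := by
  rw [PySem.Dict.getD_insert]
  split_ifs <;> simp [hd]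

lemma seed_getD (k : List Char) : mipredSeed.getD k 0 = 0 := by
  simp only [mipredSeed, List.foldl]
  repeat refine getD_insert_zero _ (fun j => ?_) _ _
  simp [PySem.Dict.getD_empty]

-- a counting loop over keyed elements: final lookup = count in the mapped key list
lemma getD_foldl_insert_key {κ : Type} [BEq κ] [LawfulBEq κ] [DecidableEq κ] (l : List Int) (key : Int → κ)
    (d : PySem.Dict κ Int) (v : κ) :
    (l.foldl (fun d i => d.insert (key i) (d.getD (key i) 0 + 1)) d).getD v 0
      = d.getD v 0 + ((l.map key).count v : Int) := by
  induction l generalizing d with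
  | nil => simp
  | cons i t ih =>
    simp only [List.foldl, List.map_cons, List.count_cons]
    rw [ih, PySem.Dict.getD_insert]
    split_ifs with h h2 h3
    · subst h
      push_cast
      ring
    · subst h
      simp at h2
    · exact absurd (eq_of_beq h3).symm h
    · push_cast
      ring

-- on indices below len-1, the slice s[i:i+2] is the two-character list
lemma map_pairs (sequence : String) :
    (PySem.List.pyRange 0 (PySem.Str.len sequence - 1) 1).map
        (fun i => PySem.List.slice sequence.toList (some i) (some (i + 2)))
      = (PySem.List.pyRange 0 (PySem.Str.len sequence - 1) 1).map
        (fun i => [PySem.List.pyGetD sequence.toList i 'A', PySem.List.pyGetD sequence.toList (i + 1) 'A']) := by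
  simp only [PySem.Str.len_eq]
  generalize hs : sequence.toList = s
  apply List.map_congr_left
  intro i hi
  have hmem := (PySem.List.mem_pyRange_one).mp hi
  have h0 : 0 ≤ i := hmem.1
  have h1 : i < (s.length : Int) - 1 := hmem.2
  have hlt : i.toNat + 1 < s.length := by omega
  have htn : (i + 2).toNat - i.toNat = 2 := by omega
  have htn1 : (i + 1).toNat = i.toNat + 1 := by omega
  rw [PySem.List.slice_toNat s h0 (by omega), htn,
    List.drop_eq_getElem_cons (by omega), List.drop_eq_getElem_cons hlt]
  rw [PySem.List.pyGetD_eq_getElem s 'A' h0 (by omega),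
    PySem.List.pyGetD_eq_getElem s 'A' (by omega) (by omega)]
  simp [List.take, htn1]

-- the indexed dinucleotide list A scans equals the adjacent-pair zip, viewed as 2-lists
lemma indexed_pairs_eq_zip (s : List Char) :
    (PySem.List.pyRange 0 ((s.length : Int) - 1) 1).map
        (fun i => [PySem.List.pyGetD s i 'A', PySem.List.pyGetD s (i + 1) 'A'])
      = (s.zip s.tail).map (fun p => [p.1, p.2]) := by
  apply List.ext_getElem
  · simp [PySem.List.length_pyRange_one, List.length_zip]
  · intro k h1 h2
    rw [List.length_map, PySem.List.length_pyRange_one] at h1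
    have hk1 : k + 1 < s.length := by omega
    simp only [List.getElem_map, PySem.List.getElem_pyRange_one, List.getElem_zip, List.getElem_tail]
    have e1 : (0 : Int) + (k : Int) = ((k : Nat) : Int) := by omega
    have e2 : (k : Int) + 1 = (((k + 1 : Nat)) : Int) := by push_cast; ring
    rw [e1, e2, PySem.List.pyGetD_natCast, PySem.List.pyGetD_natCast,
      List.getD_eq_getElem s 'A' (by omega), List.getD_eq_getElem s 'A' hk1]

-- the injective 2-list view of a pair preserves counts
lemma count_map_pair (l : List (Char × Char)) (n m : Char) :
    (l.map (fun p => [p.1, p.2])).count [n, m] = l.count (n, m) := by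
  have hinj : Function.Injective (fun (p : Char × Char) => [p.1, p.2]) := by
    intro a b h
    simp at h
    exact Prod.ext h.1 h.2
  exact List.count_map_of_injective l _ hinj (n, m)

-- appending one character extends the adjacent-pair list by one pair
lemma zip_tail_concat (t : List Char) (d c : Char) :
    (t ++ [d, c]).zip ((t ++ [d, c]).tail)
      = (t ++ [d]).zip ((t ++ [d]).tail) ++ [(d, c)] := by
  induction t with
  | nil => simp
  | cons x t ih =>
    cases t with
    | nil => simp
    | cons y t => simpa using ih

-- 'ACGU'.find on each nucleotide
lemma find_lit_A : PySem.Chars.find ['A','C','G','U'] ['A'] = 0 := by decide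
lemma find_lit_C : PySem.Chars.find ['A','C','G','U'] ['C'] = 1 := by decide
lemma find_lit_G : PySem.Chars.find ['A','C','G','U'] ['G'] = 2 := by decide
lemma find_lit_U : PySem.Chars.find ['A','C','G','U'] ['U'] = 3 := by decide

-- 'ACGU'.find is -1 on every other character
lemma find_other (c : Char) (h : ¬ (c = 'A' ∨ c = 'C' ∨ c = 'G' ∨ c = 'U')) :
    PySem.Chars.find ['A','C','G','U'] [c] = -1 := by
  have he : ['A','C','G','U'] = "ACGU".toList := by decide
  rw [he]
  rw [PySem.Chars.find_eq_neg_one_iff]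
  intro hinf
  have := hinf.subset (List.mem_singleton_self c)
  simp at this
  tauto

-- every character is one of the four nucleotides or has find = -1
lemma char5 (c : Char) : c = 'A' ∨ c = 'C' ∨ c = 'G' ∨ c = 'U' ∨
    (PySem.Chars.find ['A','C','G','U'] [c] = -1 ∧ c ≠ 'A' ∧ c ≠ 'C' ∧ c ≠ 'G' ∧ c ≠ 'U') := by
  by_cases h : c = 'A' ∨ c = 'C' ∨ c = 'G' ∨ c = 'U'
  · tauto
  · have hf := find_other c h
    tauto

-- THE B-LOOP INVARIANT: the fold computes the count vector and the last character's index
lemma foldB_eq (s : List Char) :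
    s.foldl mipredStep (List.replicate 20 0, -1) = (cntVec s, lastIdx s) := by
  induction s using List.reverseRecOn with
  | nil => decide
  | append_singleton t c ih =>
    rw [List.foldl_append, ih]
    rcases List.eq_nil_or_concat t with rfl | ⟨t', d, rfl⟩
    · rcases char5 c with rfl | rfl | rfl | rfl | ⟨hf, h1, h2, h3, h4⟩ <;>
        (simp [mipredStep, mipredBump, lastIdx, cntVec, PySem.List.pySetD_of_nonneg,
          PySem.List.pyGetD_ofNat', find_lit_A, find_lit_C, find_lit_G, find_lit_U, *]; try omega)
    · rw [List.concat_eq_append] at *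
      rcases char5 d with rfl | rfl | rfl | rfl | ⟨hfd, hd1, hd2, hd3, hd4⟩ <;>
        rcases char5 c with rfl | rfl | rfl | rfl | ⟨hfc, hc1, hc2, hc3, hc4⟩ <;>
        (simp [mipredStep, mipredBump, lastIdx, cntVec, List.append_assoc, zip_tail_concat,
          List.count_append, PySem.List.pySetD_of_nonneg,
          find_lit_A, find_lit_C, find_lit_G, find_lit_U,
          PySem.List.pyGetD_ofNat', *]; try omega)

-- ===== VERDICT (by name: the statement is the Claim_ definition above) =====
theorem mipred_feats_spec : Claim_equal_mipred_feats := by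
  intro sequence structure_ _dom _pre
  unfold Spec_mipred_feats mipred_feats mipred_feats_alt
  simp only [List.foldl]
  rw [foldB_eq sequence.toList]
  have hdinA : ∀ n m : Char,
      (List.foldl (fun (d : PySem.Dict (List Char) Int) (i : Int) =>
          d.insert (PySem.List.slice sequence.toList (some i) (some (i + 2)))
            (d.getD (PySem.List.slice sequence.toList (some i) (some (i + 2))) 0 + 1))
        mipredSeed (PySem.List.pyRange 0 (PySem.Str.len sequence - 1) 1)).getD [n, m] 0
      = ((sequence.toList.zip sequence.toList.tail).count (n, m) : Int) := by
    intro n m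
    rw [getD_foldl_insert_key _
      (fun i => PySem.List.slice sequence.toList (some i) (some (i + 2)))]
    rw [map_pairs, seed_getD]
    rw [PySem.Str.len_eq, indexed_pairs_eq_zip, count_map_pair]
    simp
  simp only [hdinA, chars_count_singleton, cntVec]
  simp [PySem.List.pyGetD_ofNat', PySem.List.slice_to, PySem.List.slice_from]
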